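-- pv_equiv track=rewrite | github.com/guanton/causality_path_signatures | data_generation.py | generate_variable_indices
-- ===== SOURCE A (Python) =====
-- import itertools
--
-- def generate_variable_indices(m: int, q: int) -> dict:
--     """
--     Generates a mapping from variable names to their indices in the tensors.
--
--     Returns:
--     dict: A dictionary where keys are variable names and values are indices arranged.
--     """
--     variable_indices = {}  # Initialize empty dict
--     idx = 0  # Starting index
--
--     variable_names = ['t'] + [f'Y_{i}' for i in range(1, m + 1)]  # ['t', 'Y_1', 'Y_2']
--
--     # Level 1 variables (primary variables including time)
--     for var_name in variable_names:
--         variable_indices[var_name] = idx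
--         idx += 1
--
--     # Higher-level variables
--     for level in range(2, q + 1):
--         for idx_tuple in itertools.product(range(len(variable_names)), repeat=level):
--             var_name = '_'.join(variable_names[i] for i in idx_tuple)
--             variable_indices[var_name] = idx
--             idx += 1
--
--     return variable_indices
-- ===== SOURCE B (Python) =====
-- def generate_variable_indices(m: int, q: int) -> dict:
--     """
--     Generates a mapping from variable names to their indices in the tensors.
--
--     Builds each level's names incrementally from the previous level's strings
--     (prefixing a base variable name) instead of enumerating index tuples
--     with itertools.product.
--     """
--     variable_names = ['t'] + [f'Y_{i}' for i in range(1, m + 1)]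
--     variable_indices = {name: i for i, name in enumerate(variable_names)}
--     idx = len(variable_names)
--     prev = variable_names
--     for _level in range(2, q + 1):
--         cur = [base + '_' + p for base in variable_names for p in prev]
--         for name in cur:
--             variable_indices[name] = idx
--             idx += 1
--         prev = cur
--     return variable_indices
-- ===== Notes on version B (the rewrite author's own statement) =====
-- stated objective: alternative
-- what changed: B builds each level's names incrementally from the previous level's name strings (prefixing each base variable name) instead of enumerating index tuples with itertools.product and re-joining every tuple from scratch.
import Mathlib
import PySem

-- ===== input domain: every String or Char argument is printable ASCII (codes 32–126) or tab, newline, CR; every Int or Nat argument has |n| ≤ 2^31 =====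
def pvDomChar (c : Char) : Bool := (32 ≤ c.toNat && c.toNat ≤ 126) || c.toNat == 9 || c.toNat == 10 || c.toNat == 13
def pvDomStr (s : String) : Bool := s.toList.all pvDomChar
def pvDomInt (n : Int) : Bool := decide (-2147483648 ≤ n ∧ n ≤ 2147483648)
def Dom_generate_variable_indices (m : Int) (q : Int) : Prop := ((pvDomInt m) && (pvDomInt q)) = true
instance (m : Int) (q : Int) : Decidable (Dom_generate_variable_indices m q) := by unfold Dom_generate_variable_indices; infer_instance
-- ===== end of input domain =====

-- B builds each level's names from the previous level's strings (prefixing a base name)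
-- instead of enumerating index tuples with itertools.product; objective: alternative decomposition.


-- ===== PORT A =====
-- variable_names = ['t'] + [f'Y_{i}' for i in range(1, m + 1)]  (identical line in both Pythons)
def pvNames (m : Int) : List String :=
  "t" :: (PySem.List.pyRange 1 (m + 1)).map (fun i => "Y_" ++ PySem.Int.toStr i)

-- list(itertools.product(range n, repeat = L)), lexicographic (leftmost slowest)
def pvProd (n : Nat) : Nat → List (List Nat)
  | 0 => [[]]
  | L + 1 => (List.range n).flatMap (fun i => (pvProd n L).map (i :: ·))

def generate_variable_indices (m : Int) (q : Int) : List (String × Int) :=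
  let variable_names := pvNames m
  -- level 1: for var_name in variable_names: variable_indices[var_name] = idx; idx += 1
  let st1 := variable_names.foldl
    (fun (st : PySem.Dict String Int × Int) nm => (st.1.insert nm st.2, st.2 + 1))
    (PySem.Dict.empty, 0)
  -- for level in range(2, q+1): for idx_tuple in product(...): join and insert
  let st2 := (PySem.List.pyRange 2 (q + 1)).foldl
    (fun st level =>
      (pvProd variable_names.length level.toNat).foldl
        (fun (st : PySem.Dict String Int × Int) t =>
          (st.1.insert
            (PySem.Str.join "_" (t.map (fun i => variable_names.getD i ""))) st.2,
           st.2 + 1))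
        st)
    st1
  st2.1.items

-- ===== PORT B =====
-- for name in cur: variable_indices[name] = idx; idx += 1
def pvAssign (st : PySem.Dict String Int × Int) (nms : List String) :
    PySem.Dict String Int × Int :=
  nms.foldl (fun s nm => (s.1.insert nm s.2, s.2 + 1)) st

def generate_variable_indices_alt (m : Int) (q : Int) : List (String × Int) :=
  let variable_names := pvNames m
  -- {name: i for i, name in enumerate(variable_names)}
  let d0 := (PySem.List.enumerate variable_names).foldl
    (fun (d : PySem.Dict String Int) p => d.insert p.2 p.1) PySem.Dict.empty
  -- prev = variable_names; for _level in range(2, q+1): cur = [b + '_' + p ...]; assign; prev = cur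
  let st := (PySem.List.pyRange 2 (q + 1)).foldl
    (fun (st : (PySem.Dict String Int × Int) × List String) _level =>
      let cur := variable_names.flatMap (fun b => st.2.map (fun p => b ++ "_" ++ p))
      (pvAssign st.1 cur, cur))
    ((d0, (variable_names.length : Int)), variable_names)
  st.1.1.items

-- ===== PRECONDITION & SPEC =====
def Spec_generate_variable_indices (m : Int) (q : Int) (out : List (String × Int)) : Prop := out = generate_variable_indices_alt m q
instance (m : Int) (q : Int) (out : List (String × Int)) : Decidable (Spec_generate_variable_indices m q out) := by unfold Spec_generate_variable_indices; infer_instance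

-- ===== CLAIM (what is proved, stated in full; the proofs are below) =====
def Claim_equal_generate_variable_indices : Prop := ∀ (m : Int) (q : Int), Dom_generate_variable_indices m q → Spec_generate_variable_indices m q (generate_variable_indices m q)

-- ===== LEMMAS AND PROOFS =====

-- the name '_'.join(variable_names[i] for i in idx_tuple)
def pvName (names : List String) (t : List Nat) : String :=
  PySem.Str.join "_" (t.map (fun i => names.getD i ""))

-- all names of one level, in A's (itertools.product) order
def pvLvl (names : List String) (L : Nat) : List String :=
  (pvProd names.length L).map (pvName names)

theorem pv_join_singleton (s : String) : PySem.Str.join "_" [s] = s := by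
  simp [PySem.Str.join, PySem.Chars.join_singleton, String.ofList_toList]

theorem pv_join_cons (p x : String) (rest : List String) :
    PySem.Str.join "_" (p :: x :: rest) = p ++ "_" ++ PySem.Str.join "_" (x :: rest) := by
  simp only [PySem.Str.join, List.map_cons, PySem.Chars.join_cons_cons,
    String.ofList_append, String.ofList_toList]

theorem pv_length_of_mem_pvProd (n : Nat) : ∀ (L : Nat) (t : List Nat), t ∈ pvProd n L → t.length = L := by
  intro L
  induction L with
  | zero => intro t ht; simp_all [pvProd]
  | succ L ih =>
    intro t ht
    simp only [pvProd, List.mem_flatMap, List.mem_map] at ht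
    obtain ⟨i, -, t', ht', rfl⟩ := ht
    simp [ih t' ht']

theorem pv_map_getD_range (l : List String) :
    (List.range l.length).map (fun i => l.getD i "") = l := by
  apply List.ext_getElem
  · simp
  · intro j h1 h2
    simp [List.getD, List.getElem?_eq_getElem h2]

theorem pv_lvl_one (names : List String) : pvLvl names 1 = names := by
  unfold pvLvl pvProd pvProd
  rw [show ((List.range names.length).flatMap fun i => [[]].map (i :: ·))
        = (List.range names.length).map (fun i => [i]) by
      simp only [List.map_cons, List.map_nil]
      exact List.map_eq_flatMap.symm]
  rw [List.map_map]
  calc (List.range names.length).map (pvName names ∘ fun i => [i])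
      = (List.range names.length).map (fun i => names.getD i "") := by
        apply List.map_congr_left
        intro i _
        simp [pvName, pv_join_singleton]
    _ = names := pv_map_getD_range names

theorem pv_lvl_step (names : List String) (L : Nat) :
    pvLvl names (L + 2) =
      names.flatMap (fun b => (pvLvl names (L + 1)).map (fun p => b ++ "_" ++ p)) := by
  conv_lhs => rw [pvLvl, pvProd]
  rw [List.map_flatMap]
  have h1 : ∀ i ∈ List.range names.length,
      ((pvProd names.length (L + 1)).map (i :: ·)).map (pvName names)
        = (pvLvl names (L + 1)).map (fun p => names.getD i "" ++ "_" ++ p) := by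
    intro i _
    rw [List.map_map, pvLvl, List.map_map]
    apply List.map_congr_left
    intro t ht
    have hlen := pv_length_of_mem_pvProd names.length (L + 1) t ht
    match t, hlen with
    | a :: t', _ =>
      simp only [pvName, List.map_cons, Function.comp_apply]
      rw [pv_join_cons]
  rw [List.flatMap_congr h1,
      ← List.flatMap_map (fun i => names.getD i "")
        (fun b => (pvLvl names (L + 1)).map (fun p => b ++ "_" ++ p)),
      pv_map_getD_range]

-- level-1 dict comprehension = A's first loop
theorem pv_assign_enumerate (nms : List String) :
    ∀ (d : PySem.Dict String Int) (i : Int),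
      pvAssign (d, i) nms =
        ((PySem.List.enumerate nms i).foldl (fun d p => d.insert p.2 p.1) d,
         i + nms.length) := by
  induction nms with
  | nil => intro d i; simp [pvAssign, PySem.List.enumerate]
  | cons x xs ih =>
    intro d i
    simp only [pvAssign, List.foldl_cons, PySem.List.enumerate, List.length_cons]
    have := ih (d.insert x i) (i + 1)
    simp only [pvAssign] at this
    rw [this]
    congr 1
    push_cast
    ring

-- the main loop invariant: B's prev-carrying fold tracks A's per-level recomputation
theorem pv_main (names : List String) (k : Nat) (st : PySem.Dict String Int × Int) :
    (List.range k).foldl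
      (fun (st : (PySem.Dict String Int × Int) × List String) _j =>
        let cur := names.flatMap (fun b => st.2.map (fun p => b ++ "_" ++ p))
        (pvAssign st.1 cur, cur))
      (st, names)
    = ((List.range k).foldl
        (fun st j =>
          (pvProd names.length (j + 2)).foldl
            (fun (st : PySem.Dict String Int × Int) t =>
              (st.1.insert (pvName names t) st.2, st.2 + 1)) st)
        st,
       pvLvl names (k + 1)) := by
  induction k generalizing st with
  | zero => simp [pv_lvl_one]
  | succ k ih =>
    rw [List.range_succ, List.foldl_append, List.foldl_append, ih]
    simp only [List.foldl_cons, List.foldl_nil]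
    rw [← pv_lvl_step]
    congr 1
    show pvAssign _ (pvLvl names (k + 2)) = _
    rw [pvLvl, pvAssign, List.foldl_map]

-- ===== VERDICT (by name: the statement is the Claim_ definition above) =====
theorem generate_variable_indices_spec : Claim_equal_generate_variable_indices := by
  intro m q _
  unfold Spec_generate_variable_indices generate_variable_indices generate_variable_indices_alt
  simp only []
  -- name the shared pieces
  set names := pvNames m with hnames
  -- level-1 state
  have h1 : names.foldl
      (fun (st : PySem.Dict String Int × Int) nm => (st.1.insert nm st.2, st.2 + 1))
      (PySem.Dict.empty, 0)
      = ((PySem.List.enumerate names).foldl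
          (fun (d : PySem.Dict String Int) p => d.insert p.2 p.1) PySem.Dict.empty,
         (names.length : Int)) := by
    have := pv_assign_enumerate names PySem.Dict.empty 0
    simp only [pvAssign] at this
    rw [this]
    simp
  rw [h1]
  -- the level loop: rewrite range(2, q+1) as a map over List.range
  rw [PySem.List.pyRange_one 2 (q + 1)]
  rw [List.foldl_map, List.foldl_map]
  have htn : ∀ (j : Nat), ((2 : Int) + (j : Nat)).toNat = j + 2 := by intro j; omega
  simp only [htn]
  have := pv_main names ((q + 1 - 2).toNat)
    ((PySem.List.enumerate names).foldl
      (fun (d : PySem.Dict String Int) p => d.insert p.2 p.1) PySem.Dict.empty,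
     (names.length : Int))
  simp only [pvName] at this
  rw [congrArg (fun (s : (PySem.Dict String Int × Int) × List String) => s.1.1.items) this]
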